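-- pv_equiv track=rewrite | github.com/dariansweb/pythonist_studies | structure/kiss_silly/kiss_movie.py | buy_snacks
-- ===== SOURCE A (Python) =====
-- def buy_snacks(money):
--     purchased_snacks = {"popcorn": 0, "soda": 0, "candy": 0}
--
--     if money > 0:
--         while money > 0:
--             if money >= 3:
--                 purchased_snacks["popcorn"] = purchased_snacks["popcorn"] + 1
--                 money = money - 3
--             if money >= 2:
--                 purchased_snacks["soda"] = purchased_snacks["soda"] + 1
--                 money = money - 2
--             if money >= 1:
--                 purchased_snacks["candy"] = purchased_snacks["candy"] + 1
--                 money = money - 1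
--
--     return purchased_snacks
-- ===== SOURCE B (Python) =====
-- def buy_snacks(money):
--     if money <= 0:
--         return {"popcorn": 0, "soda": 0, "candy": 0}
--     q, r = divmod(money, 6)
--     return {"popcorn": q + (1 if r >= 3 else 0),
--             "soda": q + (1 if r in (2, 5) else 0),
--             "candy": q + (1 if r in (1, 4) else 0)}
-- ===== Notes on version B (the rewrite author's own statement) =====
-- stated objective: faster
-- what changed: Replaced the O(money) while-loop that buys popcorn/soda/candy round by round with a closed form: q = money//6 of each snack plus one remainder adjustment from money%6.
import Mathlib
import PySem

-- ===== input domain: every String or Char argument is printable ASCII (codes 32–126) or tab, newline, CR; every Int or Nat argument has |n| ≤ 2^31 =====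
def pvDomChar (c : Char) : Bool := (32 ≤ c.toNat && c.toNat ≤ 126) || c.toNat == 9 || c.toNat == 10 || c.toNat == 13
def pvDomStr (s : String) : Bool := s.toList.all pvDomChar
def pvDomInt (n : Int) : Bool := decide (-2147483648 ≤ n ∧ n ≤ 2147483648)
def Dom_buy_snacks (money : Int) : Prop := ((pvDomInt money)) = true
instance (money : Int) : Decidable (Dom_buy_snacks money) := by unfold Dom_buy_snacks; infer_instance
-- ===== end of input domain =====

-- B replaces A's O(money) round-by-round while-loop with an O(1) closed form (money // 6 plus a remainder pass).

-- ===== PORT A =====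
-- the while-loop of A: one recursive call per loop iteration, same dict updates in the same order
def buyLoop (money : Int) (d : PySem.Dict String Int) : PySem.Dict String Int :=
  if money > 0 then
    let d1 := if money ≥ 3 then d.insert "popcorn" (d.getD "popcorn" 0 + 1) else d
    let m1 := if money ≥ 3 then money - 3 else money
    let d2 := if m1 ≥ 2 then d1.insert "soda" (d1.getD "soda" 0 + 1) else d1
    let m2 := if m1 ≥ 2 then m1 - 2 else m1
    let d3 := if m2 ≥ 1 then d2.insert "candy" (d2.getD "candy" 0 + 1) else d2
    let m3 := if m2 ≥ 1 then m2 - 1 else m2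
    buyLoop m3 d3
  else d
termination_by money.toNat
decreasing_by

  split_ifs <;> omega

def buy_snacks (money : Int) : List (String × Int) :=
  let purchased : PySem.Dict String Int := PySem.Dict.ofList [("popcorn", 0), ("soda", 0), ("candy", 0)]
  (if money > 0 then buyLoop money purchased else purchased).items

-- ===== PORT B =====
def buy_snacks_alt (money : Int) : List (String × Int) :=
  if money ≤ 0 then [("popcorn", 0), ("soda", 0), ("candy", 0)]
  else
    let q := PySem.Int.floordiv money 6
    let r := PySem.Int.mod money 6
    [("popcorn", q + (if r ≥ 3 then 1 else 0)),
     ("soda", q + (if r = 2 ∨ r = 5 then 1 else 0)),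
     ("candy", q + (if r = 1 ∨ r = 4 then 1 else 0))]

-- ===== PRECONDITION & SPEC =====
def Spec_buy_snacks (money : Int) (out : List (String × Int)) : Prop := out = buy_snacks_alt money
instance (money : Int) (out : List (String × Int)) : Decidable (Spec_buy_snacks money out) := by unfold Spec_buy_snacks; infer_instance

-- ===== CLAIM (what is proved, stated in full; the proofs are below) =====
def Claim_equal_buy_snacks : Prop := ∀ (money : Int), Dom_buy_snacks money → Spec_buy_snacks money (buy_snacks money)

-- ===== LEMMAS AND PROOFS =====

-- one-step evaluation of A's dict operations on the fixed three-key dict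
@[simp] lemma insP (p s c v : Int) :
    (PySem.Dict.mk [("popcorn",p),("soda",s),("candy",c)]).insert "popcorn" v
      = PySem.Dict.mk [("popcorn",v),("soda",s),("candy",c)] := rfl
@[simp] lemma insS (p s c v : Int) :
    (PySem.Dict.mk [("popcorn",p),("soda",s),("candy",c)]).insert "soda" v
      = PySem.Dict.mk [("popcorn",p),("soda",v),("candy",c)] := rfl
@[simp] lemma insC (p s c v : Int) :
    (PySem.Dict.mk [("popcorn",p),("soda",s),("candy",c)]).insert "candy" v
      = PySem.Dict.mk [("popcorn",p),("soda",s),("candy",v)] := rfl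
@[simp] lemma getP (p s c : Int) :
    (PySem.Dict.mk [("popcorn",p),("soda",s),("candy",c)]).getD "popcorn" 0 = p := rfl
@[simp] lemma getS (p s c : Int) :
    (PySem.Dict.mk [("popcorn",p),("soda",s),("candy",c)]).getD "soda" 0 = s := rfl
@[simp] lemma getC (p s c : Int) :
    (PySem.Dict.mk [("popcorn",p),("soda",s),("candy",c)]).getD "candy" 0 = c := rfl

-- closed-form counts of each snack bought by A's loop starting at m
def popCnt (m : Int) : Int := if m ≤ 0 then 0 else m / 6 + (if m % 6 ≥ 3 then 1 else 0)
def sodCnt (m : Int) : Int := if m ≤ 0 then 0 else m / 6 + (if m % 6 = 2 ∨ m % 6 = 5 then 1 else 0)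
def canCnt (m : Int) : Int := if m ≤ 0 then 0 else m / 6 + (if m % 6 = 1 ∨ m % 6 = 4 then 1 else 0)

lemma buyLoop_closed (n : Nat) : ∀ (m : Int), m.toNat = n → ∀ (p s c : Int),
    buyLoop m (PySem.Dict.mk [("popcorn", p), ("soda", s), ("candy", c)]) =
      PySem.Dict.mk [("popcorn", p + popCnt m), ("soda", s + sodCnt m), ("candy", c + canCnt m)] := by
  induction n using Nat.strong_induction_on with
  | _ n ih =>
    intro m hm p s c
    by_cases h0 : m ≤ 0
    · rw [buyLoop.eq_def]
      simp only [show ¬ m > 0 by omega, if_false]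
      simp [popCnt, sodCnt, canCnt, h0]
    · by_cases h6 : m ≥ 6
      · rw [buyLoop.eq_def]
        have h3 : m > 0 := by omega
        simp only [h3, if_true, show m ≥ 3 from by omega, show m - 3 ≥ 2 from by omega,
          show m - 3 - 2 ≥ 1 from by omega, if_true]
        simp only [insP, insS, insC, getP, getS, getC]
        rw [show m - 3 - 2 - 1 = m - 6 from by ring, ih (m - 6).toNat (by omega) (m - 6) rfl]
        have e1 : popCnt m = popCnt (m - 6) + 1 := by
          unfold popCnt; split_ifs <;> omega
        have e2 : sodCnt m = sodCnt (m - 6) + 1 := by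
          unfold sodCnt; split_ifs <;> omega
        have e3 : canCnt m = canCnt (m - 6) + 1 := by
          unfold canCnt; split_ifs <;> omega
        rw [e1, e2, e3]; ring_nf
      · -- 1 ≤ m ≤ 5 : one pass of the loop finishes
        have h1 : 1 ≤ m := by omega
        have h5 : m ≤ 5 := by omega
        interval_cases m <;>
          · rw [buyLoop.eq_def]
            norm_num
            rw [buyLoop.eq_def]
            norm_num [popCnt, sodCnt, canCnt]
            try ring_nf

-- ===== VERDICT (by name: the statement is the Claim_ definition above) =====
theorem buy_snacks_spec : Claim_equal_buy_snacks := by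
  intro money _
  unfold Spec_buy_snacks buy_snacks buy_snacks_alt
  by_cases h : money > 0
  · simp only [h, if_true, show ¬ money ≤ 0 by omega, if_false]
    have := buyLoop_closed money.toNat money rfl 0 0 0
    rw [show (PySem.Dict.ofList [("popcorn", (0:Int)), ("soda", 0), ("candy", 0)]) =
        PySem.Dict.mk [("popcorn", 0), ("soda", 0), ("candy", 0)] from by decide, this]
    simp only [zero_add]
    rw [PySem.Int.floordiv_eq_ediv_of_pos (by omega), PySem.Int.mod_eq_emod_of_pos (by omega)]
    simp [popCnt, sodCnt, canCnt, show ¬ money ≤ 0 by omega]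
  · simp only [h, if_false, show money ≤ 0 by omega, if_true]
    decide
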